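-- pv_equiv track=rewrite | github.com/Russy-Veemon/VeemonCodeWarsReps | CodeWarsFeb1323.py | row_weights
-- ===== SOURCE A (Python) =====
-- def row_weights(array):
--     team1 = 0
--     team2 = 0
--     for i, weight in enumerate(array):
--     # the enumerate function being used in the for loop returns a series of tuples where
--     #     each tuple contains an index and a corresponding item from the iterable array
--         if i % 2 == 0:
--             team1 += weight
--         #the modulus is used in the if statement to separate the even and odds
--         else:
--             team2 += weight
--     return (team1, team2)
-- ===== SOURCE B (Python) =====
-- def row_weights(array):
--     # Index-free back-to-front pass: each step swaps the two sums, so parity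
--     # emerges from position without any i % 2 test.
--     t1 = t2 = 0
--     for w in reversed(array):
--         t1, t2 = t2 + w, t1
--     return (t1, t2)
-- ===== Notes on version B (the rewrite author's own statement) =====
-- stated objective: alternative
-- what changed: Replaces the indexed loop with an i%2 branch by an index-free back-to-front pass that swaps the two accumulated sums at each step, removing the per-element enumerate tuple and parity test.
import Mathlib
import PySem

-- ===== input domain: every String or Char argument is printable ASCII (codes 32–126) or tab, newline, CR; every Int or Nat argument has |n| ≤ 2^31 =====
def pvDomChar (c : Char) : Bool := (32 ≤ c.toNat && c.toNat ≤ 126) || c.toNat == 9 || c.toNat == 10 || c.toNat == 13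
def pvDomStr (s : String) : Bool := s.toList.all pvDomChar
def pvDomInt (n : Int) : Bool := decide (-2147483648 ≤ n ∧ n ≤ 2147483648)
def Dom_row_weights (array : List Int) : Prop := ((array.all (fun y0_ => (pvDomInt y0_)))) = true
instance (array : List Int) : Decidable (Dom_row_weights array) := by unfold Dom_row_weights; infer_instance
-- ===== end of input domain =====

-- B replaces A's indexed loop with an i%2 branch by an index-free back-to-front pass
-- that swaps the two accumulated sums at each step (alternative decomposition, same cost).


-- ===== PORT A =====
def row_weights (array : List Int) : Int × Int :=
  (PySem.List.enumerate array).foldl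
    (fun t p => if PySem.Int.mod p.1 2 = 0 then (t.1 + p.2, t.2) else (t.1, t.2 + p.2))
    (0, 0)

-- ===== PORT B =====
def row_weights_alt (array : List Int) : Int × Int :=
  array.reverse.foldl (fun t w => (t.2 + w, t.1)) (0, 0)

-- ===== PRECONDITION & SPEC =====
def Spec_row_weights (array : List Int) (out : Int × Int) : Prop := out = row_weights_alt array
instance (array : List Int) (out : Int × Int) : Decidable (Spec_row_weights array out) := by unfold Spec_row_weights; infer_instance

-- ===== CLAIM (what is proved, stated in full; the proofs are below) =====
def Claim_equal_row_weights : Prop := ∀ (array : List Int), Dom_row_weights array → Spec_row_weights array (row_weights array)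

-- ===== LEMMAS AND PROOFS =====

-- Proof helper: the structural-recursion form of B's swap fold.
def rwAux : List Int → Int × Int
  | [] => (0, 0)
  | x :: rest =>
    let r := rwAux rest
    (r.2 + x, r.1)

theorem row_weights_alt_eq_rwAux (xs : List Int) : row_weights_alt xs = rwAux xs := by
  unfold row_weights_alt
  rw [List.foldl_reverse]
  induction xs with
  | nil => rfl
  | cons x rest ih => simp [rwAux, ih]

-- Invariant of A's fold: starting at index s with accumulator (a, b), the fold adds
-- B's swapped/unswapped pair according to the parity of s.
theorem row_weights_fold_inv (xs : List Int) :
    ∀ (s a b : Int),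
      (PySem.List.enumerate xs s).foldl
        (fun t p => if PySem.Int.mod p.1 2 = 0 then (t.1 + p.2, t.2) else (t.1, t.2 + p.2))
        (a, b)
      = if PySem.Int.mod s 2 = 0
          then (a + (rwAux xs).1, b + (rwAux xs).2)
          else (a + (rwAux xs).2, b + (rwAux xs).1) := by
  induction xs with
  | nil =>
    intro s a b
    simp [PySem.List.enumerate_nil, rwAux]
  | cons x rest ih =>
    intro s a b
    rw [PySem.List.enumerate_cons]
    simp only [List.foldl_cons]
    have hpar : PySem.Int.mod (s + 1) 2 = 0 ↔ ¬ (PySem.Int.mod s 2 = 0) := by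
      simp [PySem.Int.mod, Int.fmod_eq_emod]
      omega
    by_cases h : PySem.Int.mod s 2 = 0
    · have h1 : ¬ (PySem.Int.mod (s + 1) 2 = 0) := fun hh => (hpar.mp hh) h
      simp only [h, if_true, ih (s + 1) (a + x) b, h1, if_false, rwAux]
      ring_nf
    · have h1 : PySem.Int.mod (s + 1) 2 = 0 := hpar.mpr h
      simp only [h, if_false, ih (s + 1) a (b + x), h1, if_true,
        rwAux]
      ring_nf

-- ===== VERDICT (by name: the statement is the Claim_ definition above) =====
theorem row_weights_spec : Claim_equal_row_weights := by
  intro array _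
  unfold Spec_row_weights row_weights
  rw [row_weights_fold_inv array 0 0 0, row_weights_alt_eq_rwAux]
  norm_num [PySem.Int.mod]
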